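-- pv_equiv track=rewrite | github.com/mruduladevaguptapu2000/Operarioai | api/agent/tools/sqlite_helpers.py | _skip_leading_with_clause
-- ===== SOURCE A (Python) =====
-- def _skip_leading_with_clause(sql_upper: str) -> str:
--     """Best-effort removal of a leading WITH clause.
--
--     The input *must* already be upper-cased and stripped of comments/literals.
--     We intentionally keep this lightweight; if parsing fails we return the
--     original string so callers fall back to conservative behaviour.
--     """
--
--     if not sql_upper.startswith("WITH"):
--         return sql_upper
--
--     idx = 4  # len("WITH")
--     length = len(sql_upper)
--
--     # Skip optional RECURSIVE keyword
--     while idx < length and sql_upper[idx].isspace():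
--         idx += 1
--     if sql_upper.startswith("RECURSIVE", idx):
--         idx += len("RECURSIVE")
--         while idx < length and sql_upper[idx].isspace():
--             idx += 1
--
--     depth = 0
--     cte_finished = False
--     saw_paren = False
--
--     while idx < length:
--         ch = sql_upper[idx]
--
--         if depth == 0 and cte_finished:
--             if ch == ',':
--                 cte_finished = False
--                 idx += 1
--                 continue
--             if ch.isspace():
--                 idx += 1
--                 continue
--             return sql_upper[idx:]
--
--         if ch == '(':
--             depth += 1
--             saw_paren = True
--         elif ch == ')':
--             if depth > 0:
--                 depth -= 1
--             if depth == 0 and saw_paren: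
--                 cte_finished = True
--         idx += 1
--
--     # Parsing failed – fall back to original to stay conservative
--     return sql_upper
-- ===== SOURCE B (Python) =====
-- def _skip_leading_with_clause(sql_upper: str) -> str:
--     """Best-effort removal of a leading WITH clause.
--
--     Structured per-CTE parsing: find each CTE's '(' , jump over its balanced
--     body with a matching-paren walk, then a comma continues to the next CTE;
--     anything else starts the main statement.  On unparsable input we return
--     the original string so callers fall back to conservative behaviour.
--     """
--     if not sql_upper.startswith("WITH"):
--         return sql_upper
--
--     n = len(sql_upper)
--     idx = _skip_ws(sql_upper, 4)
--     if sql_upper.startswith("RECURSIVE", idx):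
--         idx = _skip_ws(sql_upper, idx + len("RECURSIVE"))
--
--     while True:
--         open_ = sql_upper.find('(', idx)
--         if open_ == -1:
--             return sql_upper
--         close = _matching_paren(sql_upper, open_)
--         if close is None:
--             return sql_upper
--         idx = _skip_ws(sql_upper, close + 1)
--         if idx >= n:
--             return sql_upper
--         if sql_upper[idx] != ',':
--             return sql_upper[idx:]
--         idx += 1
--
--
-- def _skip_ws(s, idx):
--     while idx < len(s) and s[idx].isspace():
--         idx += 1
--     return idx
--
--
-- def _matching_paren(s, open_):
--     """Index of the ')' closing s[open_], or None if unterminated."""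
--     depth = 1
--     for i in range(open_ + 1, len(s)):
--         if s[i] == '(':
--             depth += 1
--         elif s[i] == ')':
--             depth -= 1
--             if depth == 0:
--                 return i
--     return None
-- ===== Notes on version B (the rewrite author's own statement) =====
-- stated objective: simpler
-- what changed: Replaces A's single flag-driven character loop (depth/cte_finished/saw_paren state machine) by a structured per-CTE parse: find each CTE's '(', jump over its balanced body with a matching-paren walk, then a comma continues to the next CTE. Pre_ excludes WITH-strings whose parentheses are not prefix-balanced (a stray unmatched close-paren): malformed SQL on which both behaviours are defensible best-effort choices no caller would specify — A's flat scanner treats the stray close-paren as ending a CTE body, B's structured parser keeps scanning.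
-- outside the precondition, e.g. on _skip_leading_with_clause('WITH A AS (X), ) FOO'): A returns 'FOO', B returns 'WITH A AS (X), ) FOO'
import Mathlib
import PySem

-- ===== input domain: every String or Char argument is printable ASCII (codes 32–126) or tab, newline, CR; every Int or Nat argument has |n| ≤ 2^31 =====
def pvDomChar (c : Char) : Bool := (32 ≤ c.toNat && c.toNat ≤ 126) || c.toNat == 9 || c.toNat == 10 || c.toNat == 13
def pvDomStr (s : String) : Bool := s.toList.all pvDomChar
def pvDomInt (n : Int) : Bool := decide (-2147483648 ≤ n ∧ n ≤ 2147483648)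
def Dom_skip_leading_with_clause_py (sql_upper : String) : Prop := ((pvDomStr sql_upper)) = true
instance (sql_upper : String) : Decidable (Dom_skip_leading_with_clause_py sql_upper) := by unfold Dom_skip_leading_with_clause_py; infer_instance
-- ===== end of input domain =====

-- B replaces A's flat flag-driven character loop by a structured per-CTE parse
-- (find '(', matching-paren walk over the body, comma continues); objective: simpler.

-- shared helper: 'while idx < length and s[idx].isspace(): idx += 1' (identical line in both Pythons)
def pvSkipWs : List Char → List Char
  | [] => []
  | c :: tl => if PySem.Chars.isspace c then pvSkipWs tl else c :: tl

-- shared helper: the identical prefix handling of both Pythons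
-- (skip "WITH" (4 chars), whitespace, optional "RECURSIVE" (9 chars), whitespace)
def pvHeadRest (cs : List Char) : List Char :=
  let r1 := pvSkipWs (cs.drop 4)
  if PySem.Chars.startswith r1 ("RECURSIVE".toList) then pvSkipWs (r1.drop 9) else r1

-- ===== PORT A =====
-- A's main while loop; 'orig' is the whole string (the conservative fallback),
-- the current suffix plays the role of idx; returning 'ch :: tl' is sql_upper[idx:].
def pvALoop (orig : List Char) (rest : List Char) (depth : Nat) (cte saw : Bool) : List Char :=
  match rest with
  | [] => orig
  | ch :: tl =>
    if depth = 0 ∧ cte = true then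
      if ch = ',' then pvALoop orig tl depth false saw
      else if PySem.Chars.isspace ch then pvALoop orig tl depth cte saw
      else ch :: tl
    else
      if ch = '(' then pvALoop orig tl (depth + 1) cte true
      else if ch = ')' then
        let d := if 0 < depth then depth - 1 else depth
        pvALoop orig tl d (if d = 0 ∧ saw = true then true else cte) saw
      else pvALoop orig tl depth cte saw

def skip_leading_with_clause_py (sql_upper : String) : String :=
  if PySem.Chars.startswith sql_upper.toList ("WITH".toList) then
    String.ofList (pvALoop sql_upper.toList (pvHeadRest sql_upper.toList) 0 false false)
  else sql_upper

-- ===== PORT B =====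
-- B's sql_upper.find('(', idx): the suffix after the first '(' (none = not found)
def pvFindOpen : List Char → Option (List Char)
  | [] => none
  | c :: tl => if c = '(' then some tl else pvFindOpen tl

-- B's _matching_paren walk, as the suffix after the closing ')' (none = unterminated)
def pvMatch : List Char → Nat → Option (List Char)
  | [], _ => none
  | c :: tl, d =>
    if c = '(' then pvMatch tl (d + 1)
    else if c = ')' then (if d = 1 then some tl else pvMatch tl (d - 1))
    else pvMatch tl d

-- length facts cited by pvBLoop's termination proof
theorem pvSkipWs_length_le (l : List Char) : (pvSkipWs l).length ≤ l.length := by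
  induction l with
  | nil => simp [pvSkipWs]
  | cons c tl ih => simp only [pvSkipWs]; split <;> simp; omega

theorem pvFindOpen_length_lt : ∀ (l r : List Char), pvFindOpen l = some r → r.length < l.length := by
  intro l
  induction l with
  | nil => intro r h; simp [pvFindOpen] at h
  | cons c tl ih =>
    intro r h
    simp only [pvFindOpen] at h
    split at h
    · cases h; simp
    · have := ih r h; simp; omega

theorem pvMatch_length_le : ∀ (l : List Char) (d : Nat) (r : List Char),
    pvMatch l d = some r → r.length ≤ l.length := by
  intro l
  induction l with
  | nil => intro d r h; simp [pvMatch] at h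
  | cons c tl ih =>
    intro d r h
    simp only [pvMatch] at h
    split at h
    · have := ih _ _ h; simp; omega
    · split at h
      · split at h
        · cases h; simp
        · have := ih _ _ h; simp; omega
      · have := ih _ _ h; simp; omega

-- B's main while-True loop over CTE definitions
def pvBLoop (orig : List Char) (rest : List Char) : List Char :=
  match hf : pvFindOpen rest with
  | none => orig
  | some ao =>
    match hm : pvMatch ao 1 with
    | none => orig
    | some ac =>
      match hs : pvSkipWs ac with
      | [] => orig
      | c :: tl => if c = ',' then pvBLoop orig tl else c :: tl
termination_by rest.length
decreasing_by
  have h1 := pvFindOpen_length_lt rest ao hf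
  have h2 := pvMatch_length_le ao 1 ac hm
  have h3 := pvSkipWs_length_le ac
  rw [hs] at h3; simp at h3; omega

def skip_leading_with_clause_py_alt (sql_upper : String) : String :=
  if PySem.Chars.startswith sql_upper.toList ("WITH".toList) then
    String.ofList (pvBLoop sql_upper.toList (pvHeadRest sql_upper.toList))
  else sql_upper

-- ===== PRECONDITION & SPEC =====
-- Pre_ excludes WITH-strings whose parentheses are not prefix-balanced (a stray
-- unmatched close-paren): malformed SQL on which both behaviours are defensible
-- best-effort choices no caller would specify — A's flat scanner treats the stray
-- close-paren as ending a CTE body, B's structured parser keeps scanning.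
def Pre_skip_leading_with_clause_py (sql_upper : String) : Prop :=
  PySem.Chars.startswith sql_upper.toList ("WITH".toList) = false ∨
    ∀ i : Nat, i ≤ sql_upper.toList.length →
      (sql_upper.toList.take i).count ')' ≤ (sql_upper.toList.take i).count '('
instance (sql_upper : String) : Decidable (Pre_skip_leading_with_clause_py sql_upper) := by
  unfold Pre_skip_leading_with_clause_py; infer_instance

def pvWitness_skip_leading_with_clause_py : String := "WITH A AS (X) SELECT 1"

def Spec_skip_leading_with_clause_py (sql_upper : String) (out : String) : Prop := out = skip_leading_with_clause_py_alt sql_upper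
instance (sql_upper : String) (out : String) : Decidable (Spec_skip_leading_with_clause_py sql_upper out) := by unfold Spec_skip_leading_with_clause_py; infer_instance

-- ===== CLAIM (what is proved, stated in full; the proofs are below) =====
def Claim_equal_skip_leading_with_clause_py : Prop := ∀ (sql_upper : String), Dom_skip_leading_with_clause_py sql_upper → Pre_skip_leading_with_clause_py sql_upper → Spec_skip_leading_with_clause_py sql_upper (skip_leading_with_clause_py sql_upper)

-- ===== LEMMAS AND PROOFS =====

-- running paren depth starting at d never goes negative (prefix-balance)
def pvBal : List Char → Nat → Bool
  | [], _ => true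
  | c :: tl, d =>
    if c = '(' then pvBal tl (d + 1)
    else if c = ')' then (decide (0 < d) && pvBal tl (d - 1))
    else pvBal tl d

theorem pvBal_of_counts : ∀ (l : List Char) (d : Nat),
    (∀ i ≤ l.length, (l.take i).count ')' ≤ d + (l.take i).count '(') → pvBal l d = true := by
  intro l
  induction l with
  | nil => intro d _; simp [pvBal]
  | cons c tl ih =>
    intro d h
    by_cases h1 : c = '('
    · simp only [pvBal, if_pos h1]
      refine ih (d + 1) (fun i hi => ?_)
      have := h (i + 1) (by simp; omega)
      subst h1
      simp at this
      omega
    · by_cases h2 : c = ')'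
      · have hd : 1 ≤ d := by
          have := h 1 (by simp)
          subst h2
          simpa [List.count_cons] using this
        simp only [pvBal, if_neg h1, if_pos h2, Bool.and_eq_true, decide_eq_true_eq]
        refine ⟨by omega, ih (d - 1) (fun i hi => ?_)⟩
        have := h (i + 1) (by simp; omega)
        subst h2
        simp [h1] at this ⊢
        omega
      · simp only [pvBal, if_neg h1, if_neg h2]
        refine ih d (fun i hi => ?_)
        have := h (i + 1) (by simp; omega)
        simpa [List.count_cons, h1, h2] using this

theorem pvBal_skipWs (l : List Char) (d : Nat) : pvBal (pvSkipWs l) d = pvBal l d := by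
  induction l with
  | nil => simp [pvSkipWs]
  | cons c tl ih =>
    simp only [pvSkipWs]
    by_cases hs : PySem.Chars.isspace c = true
    · have h1 : c ≠ '(' := by rintro rfl; simp [PySem.Chars.isspace] at hs
      have h2 : c ≠ ')' := by rintro rfl; simp [PySem.Chars.isspace] at hs
      simp [hs, ih, pvBal, h1, h2]
    · simp [hs]

theorem pvMatch_bal : ∀ (l : List Char) (d : Nat) (r : List Char), 0 < d →
    pvBal l d = true → pvMatch l d = some r → pvBal r 0 = true := by
  intro l
  induction l with
  | nil => intro d r _ _ h; simp [pvMatch] at h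
  | cons c tl ih =>
    intro d r hd hb h
    simp only [pvMatch] at h
    simp only [pvBal] at hb
    split at h
    · rename_i h1
      rw [if_pos h1] at hb
      exact ih _ _ (by omega) hb h
    · rename_i h1
      split at h
      · rename_i h2
        rw [if_neg h1, if_pos h2, Bool.and_eq_true] at hb
        split at h
        · cases h
          rename_i hd1
          simpa [hd1] using hb.2
        · rename_i hd1
          exact ih _ _ (by omega) hb.2 h
      · rename_i h2
        rw [if_neg h1, if_neg h2] at hb
        exact ih _ _ hd hb h

-- unfolding equation for the well-founded pvBLoop
theorem pvBLoop_eq (orig rest : List Char) :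
    pvBLoop orig rest =
      (match pvFindOpen rest with
       | none => orig
       | some ao =>
         match pvMatch ao 1 with
         | none => orig
         | some ac =>
           match pvSkipWs ac with
           | [] => orig
           | c :: tl => if c = ',' then pvBLoop orig tl else c :: tl) := by
  rw [pvBLoop]
  split
  · rename_i h1; rw [h1]
  · rename_i ao h1
    rw [h1]; dsimp only
    split
    · rename_i h2; rw [h2]
    · rename_i ac h2
      rw [h2]; dsimp only
      split
      · rename_i h3; rw [h3]
      · rename_i c tl h3; rw [h3]

-- A's loop at depth d > 0 (inside a body) behaves like B's matching-paren walk
theorem pvALoop_balance (orig : List Char) : ∀ (rest : List Char) (d : Nat), 0 < d →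
    pvALoop orig rest d false true =
      (match pvMatch rest d with
       | none => orig
       | some r => pvALoop orig r 0 true true) := by
  intro rest
  induction rest with
  | nil =>
    intro d hd
    simp [pvALoop, pvMatch]
  | cons ch tl ih =>
    intro d hd
    obtain ⟨e, rfl⟩ := Nat.exists_eq_add_of_lt hd
    by_cases h1 : ch = '('
    · simpa [pvALoop, pvMatch, h1, Nat.add_assoc] using ih (e + 2) (by omega)
    · by_cases h2 : ch = ')'
      · cases e with
        | zero => simp [pvALoop, pvMatch, h2]
        | succ e' => simpa [pvALoop, pvMatch, h1, h2, Nat.add_assoc] using ih (e' + 1) (by omega)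
      · simpa [pvALoop, pvMatch, h1, h2, Nat.add_assoc] using ih (e + 1) (by omega)

-- A's loop in the finished state (depth 0, cte_finished = True): skip whitespace,
-- a comma re-enters the searching state, anything else returns the suffix.
theorem pvALoop_after (orig : List Char) : ∀ (rest : List Char),
    pvALoop orig rest 0 true true =
      (match pvSkipWs rest with
       | [] => orig
       | c :: tl => if c = ',' then pvALoop orig tl 0 false true else c :: tl) := by
  intro rest
  induction rest with
  | nil => simp [pvALoop, pvSkipWs]
  | cons ch tl ih =>
    by_cases h1 : ch = ','
    · have hsp : PySem.Chars.isspace ch = false := by subst h1; decide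
      have hR : pvSkipWs (ch :: tl) = ch :: tl := by simp [pvSkipWs, hsp]
      rw [hR]; dsimp only; rw [if_pos h1]
      simp [pvALoop, h1]
    · by_cases h2 : PySem.Chars.isspace ch = true
      · simpa [pvALoop, pvSkipWs, h1, h2] using ih
      · simp [pvALoop, pvSkipWs, h1, h2]

-- Main invariant on prefix-balanced suffixes: A's searching state equals B's
-- find-open loop, and A's finished state equals B's after-body step.
theorem pvMain (orig : List Char) : ∀ (n : Nat) (rest : List Char), rest.length ≤ n →
    pvBal rest 0 = true →
    ((∀ saw, pvALoop orig rest 0 false saw = pvBLoop orig rest) ∧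
     pvALoop orig rest 0 true true =
       (match pvSkipWs rest with
        | [] => orig
        | c :: tl => if c = ',' then pvBLoop orig tl else c :: tl)) := by
  intro n
  induction n with
  | zero =>
    intro rest hlen _
    have hr : rest = [] := List.eq_nil_of_length_eq_zero (by omega)
    subst hr
    constructor
    · intro saw; simp only [pvALoop]; rw [pvBLoop_eq]; rfl
    · simp only [pvALoop]; dsimp only [pvSkipWs]
  | succ n ih =>
    intro rest hlen hbal
    have hafter : ∀ (r : List Char), r.length ≤ n + 1 → pvBal r 0 = true →
        pvALoop orig r 0 true true =
          (match pvSkipWs r with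
           | [] => orig
           | c :: tl => if c = ',' then pvBLoop orig tl else c :: tl) := by
      intro r hr hb
      rw [pvALoop_after]
      cases hsw : pvSkipWs r with
      | nil => rfl
      | cons c tl =>
        dsimp only
        have htl : tl.length ≤ n := by
          have := pvSkipWs_length_le r
          rw [hsw] at this; simp at this; omega
        by_cases hc : c = ','
        · rw [if_pos hc, if_pos hc]
          have hb2 : pvBal (c :: tl) 0 = true := by rw [← hsw, pvBal_skipWs]; exact hb
          have hb3 : pvBal tl 0 = true := by
            subst hc
            simpa [pvBal] using hb2
          exact (ih tl htl hb3).1 true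
        · rw [if_neg hc, if_neg hc]
    refine ⟨?_, hafter rest hlen hbal⟩
    intro saw
    cases rest with
    | nil => simp only [pvALoop]; rw [pvBLoop_eq]; rfl
    | cons ch tl =>
      have htl : tl.length ≤ n := by simp at hlen; omega
      rw [pvBLoop_eq]
      by_cases h1 : ch = '('
      · have hbtl : pvBal tl 1 = true := by simpa [pvBal, h1] using hbal
        have hA : pvALoop orig (ch :: tl) 0 false saw = pvALoop orig tl 1 false true := by
          simp [pvALoop, h1]
        have hF : pvFindOpen (ch :: tl) = some tl := by simp [pvFindOpen, h1]
        rw [hA, pvALoop_balance orig tl 1 (by omega), hF]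
        dsimp only
        cases hbr : pvMatch tl 1 with
        | none => rfl
        | some r =>
          dsimp only
          have hrlen : r.length ≤ n + 1 := le_trans (pvMatch_length_le tl 1 r hbr) (by simp at hlen ⊢; omega)
          have hrbal : pvBal r 0 = true := pvMatch_bal tl 1 r (by omega) hbtl hbr
          rw [hafter r hrlen hrbal]
      · by_cases h2 : ch = ')'
        · exfalso
          rw [h2] at hbal
          simp [pvBal] at hbal
        · have hbtl : pvBal tl 0 = true := by simpa [pvBal, h1, h2] using hbal
          have hA : pvALoop orig (ch :: tl) 0 false saw = pvALoop orig tl 0 false saw := by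
            simp [pvALoop, h1, h2]
          have hF : pvFindOpen (ch :: tl) = pvFindOpen tl := by simp [pvFindOpen, h1]
          rw [hA, hF, (ih tl htl hbtl).1 saw, pvBLoop_eq]

-- prefix-balance survives the shared header handling (WITH / whitespace / RECURSIVE)
theorem pvBal_headRest (cs : List Char)
    (hw : PySem.Chars.startswith cs ("WITH".toList) = true)
    (hb : pvBal cs 0 = true) : pvBal (pvHeadRest cs) 0 = true := by
  obtain ⟨t, rfl⟩ := (PySem.Chars.startswith_iff cs ("WITH".toList)).1 hw
  have hdrop : (("WITH".toList ++ t).drop 4) = t := by simp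
  have hbt : pvBal t 0 = true := by
    simpa [pvBal, String.toList] using hb
  unfold pvHeadRest
  rw [hdrop]
  by_cases hr : PySem.Chars.startswith (pvSkipWs t) ("RECURSIVE".toList) = true
  · rw [if_pos hr]
    obtain ⟨t2, ht2⟩ := (PySem.Chars.startswith_iff (pvSkipWs t) ("RECURSIVE".toList)).1 hr
    have hb2 : pvBal (pvSkipWs t) 0 = true := by rw [pvBal_skipWs]; exact hbt
    rw [← ht2] at hb2 ⊢
    have hdrop9 : (("RECURSIVE".toList ++ t2).drop 9) = t2 := by simp
    rw [hdrop9, pvBal_skipWs]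
    simpa [pvBal, String.toList] using hb2
  · rw [if_neg hr, pvBal_skipWs]
    exact hbt

-- ===== VERDICT (by name: the statement is the Claim_ definition above) =====
theorem skip_leading_with_clause_py_spec : Claim_equal_skip_leading_with_clause_py := by
  intro s _ hpre
  unfold Spec_skip_leading_with_clause_py skip_leading_with_clause_py skip_leading_with_clause_py_alt
  by_cases h : PySem.Chars.startswith s.toList ("WITH".toList) = true
  · rw [if_pos h, if_pos h]
    have hcount : ∀ i ≤ s.toList.length,
        (s.toList.take i).count ')' ≤ (s.toList.take i).count '(' := by
      rcases hpre with hf | hc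
      · rw [h] at hf; cases hf
      · exact hc
    have hbal : pvBal s.toList 0 = true :=
      pvBal_of_counts s.toList 0 (fun i hi => by simpa using hcount i hi)
    have hbal2 : pvBal (pvHeadRest s.toList) 0 = true := pvBal_headRest s.toList h hbal
    rw [(pvMain s.toList (pvHeadRest s.toList).length (pvHeadRest s.toList) le_rfl hbal2).1 false]
  · rw [if_neg h, if_neg h]
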